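-- pv_equiv track=rewrite | github.com/jovisly/AdventOfCode | 2023/day_10/part2.py | get_cleaned_map
-- ===== SOURCE A (Python) =====
-- def get_cleaned_map(lines, path, new_s):
--     """Remove symbols not in the path."""
--     cleaned_map = []
--     for y, line in enumerate(lines):
--         new_line = []
--         for x, symbol in enumerate(line):
--             if (x, y) in path:
--                 if symbol == "S":
--                     new_line.append(new_s)
--                 else:
--                     new_line.append(symbol)
--             else:
--                 new_line.append("*")
--         cleaned_map.append("".join(new_line))
--     return cleaned_map
-- ===== SOURCE B (Python) =====
-- def get_cleaned_map(lines, path, new_s):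
--     """Remove symbols not in the path (scatter: paint path points onto a '*' grid)."""
--     rows = [["*"] * len(line) for line in lines]
--     for x, y in path:
--         if 0 <= y < len(lines) and 0 <= x < len(lines[y]):
--             sym = lines[y][x]
--             rows[y][x] = new_s if sym == "S" else sym
--     return ["".join(row) for row in rows]
-- ===== Notes on version B (the rewrite author's own statement) =====
-- stated objective: faster
-- what changed: B paints the path points onto a pre-built '*' grid (scatter over path with a bounds guard) instead of scanning every cell and testing list membership in path; this removes the inner membership scan, O(R*C*|path|) -> O(R*C+|path|).
import Mathlib
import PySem

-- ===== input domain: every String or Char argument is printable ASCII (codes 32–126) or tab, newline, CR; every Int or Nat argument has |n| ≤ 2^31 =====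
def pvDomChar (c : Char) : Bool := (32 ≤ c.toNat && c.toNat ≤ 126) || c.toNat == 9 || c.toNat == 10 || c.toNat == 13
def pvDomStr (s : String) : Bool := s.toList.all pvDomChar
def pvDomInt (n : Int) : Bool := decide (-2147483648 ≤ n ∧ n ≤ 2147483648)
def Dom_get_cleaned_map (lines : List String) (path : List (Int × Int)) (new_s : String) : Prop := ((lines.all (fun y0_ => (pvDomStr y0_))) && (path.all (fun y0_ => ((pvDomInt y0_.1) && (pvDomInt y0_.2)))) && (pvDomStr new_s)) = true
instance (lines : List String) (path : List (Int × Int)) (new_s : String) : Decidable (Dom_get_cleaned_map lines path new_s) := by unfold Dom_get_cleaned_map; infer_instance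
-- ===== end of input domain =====

-- B paints the path points onto a pre-built '*' grid (scatter with a bounds guard) instead of
-- scanning every cell and testing membership in path; return values proved equal on all inputs.

-- ===== PORT A =====
-- literal port: for y, line in enumerate(lines): for x, symbol in enumerate(line): append …
def get_cleaned_map (lines : List String) (path : List (Int × Int)) (new_s : String) : List String :=
  (PySem.List.enumerate lines 0).foldl (fun cleaned_map yl =>
    cleaned_map ++ [String.join ((PySem.List.enumerate yl.2.toList 0).foldl (fun new_line xs =>
      new_line ++ [if (xs.1, yl.1) ∈ path then (if xs.2 = 'S' then new_s else String.singleton xs.2) else "*"]) [])]) []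

-- ===== PORT B =====
-- one painting step: rows[y][x] = new_s if sym == "S" else sym, guarded by 0<=y<len(lines), 0<=x<len(lines[y])
def pvPaint (lines : List String) (new_s : String) (g : List (List String)) (p : Int × Int) : List (List String) :=
  if 0 ≤ p.2 ∧ p.2.toNat < lines.length ∧ 0 ≤ p.1 ∧ p.1.toNat < (lines.getD p.2.toNat "").toList.length then
    let sym := (lines.getD p.2.toNat "").toList.getD p.1.toNat ' '
    g.set p.2.toNat ((g.getD p.2.toNat []).set p.1.toNat (if sym = 'S' then new_s else String.singleton sym))
  else g

def get_cleaned_map_alt (lines : List String) (path : List (Int × Int)) (new_s : String) : List String :=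
  let rows := lines.map (fun line => line.toList.map (fun _ => "*"))
  (path.foldl (pvPaint lines new_s) rows).map String.join

-- ===== PRECONDITION & SPEC =====
def Spec_get_cleaned_map (lines : List String) (path : List (Int × Int)) (new_s : String) (out : List String) : Prop := out = get_cleaned_map_alt lines path new_s
instance (lines : List String) (path : List (Int × Int)) (new_s : String) (out : List String) : Decidable (Spec_get_cleaned_map lines path new_s out) := by unfold Spec_get_cleaned_map; infer_instance

-- ===== CLAIM (what is proved, stated in full; the proofs are below) =====
def Claim_equal_get_cleaned_map : Prop := ∀ (lines : List String) (path : List (Int × Int)) (new_s : String), Dom_get_cleaned_map lines path new_s → Spec_get_cleaned_map lines path new_s (get_cleaned_map lines path new_s)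

-- ===== LEMMAS AND PROOFS =====

-- the value both programs give to cell (x, y) holding character sym
def pvCell (path : List (Int × Int)) (new_s : String) (x y : Int) (sym : Char) : String :=
  if (x, y) ∈ path then (if sym = 'S' then new_s else String.singleton sym) else "*"

-- specification of one cleaned row (cells x, x+1, … of row y), as a list of fragments
def pvRow (path : List (Int × Int)) (new_s : String) (y : Int) : List Char → Int → List String
  | [], _ => []
  | c :: cs, x => pvCell path new_s x y c :: pvRow path new_s y cs (x + 1)

-- specification of the whole cleaned grid (rows y, y+1, …)
def pvRows (path : List (Int × Int)) (new_s : String) : List String → Int → List (List String)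
  | [], _ => []
  | l :: ls, y => pvRow path new_s y l.toList 0 :: pvRows path new_s ls (y + 1)

theorem pvRow_length (path : List (Int × Int)) (new_s : String) (y : Int) :
    ∀ (cs : List Char) (x : Int), (pvRow path new_s y cs x).length = cs.length := by
  intro cs
  induction cs with
  | nil => intro x; rfl
  | cons c cs ih => intro x; simp [pvRow, ih]

theorem pvRow_getElem? (path : List (Int × Int)) (new_s : String) (y : Int) :
    ∀ (cs : List Char) (x : Int) (k : Nat),
      (pvRow path new_s y cs x)[k]? = cs[k]?.map (fun c => pvCell path new_s (x + (k : Int)) y c) := by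
  intro cs
  induction cs with
  | nil => intro x k; rfl
  | cons c cs ih =>
      intro x k
      cases k with
      | zero => simp [pvRow]
      | succ k =>
          simp [pvRow, ih, List.getElem?_cons_succ]
          rw [show x + ((k : Int) + 1) = x + 1 + (k : Int) by ring]

theorem pvRows_length (path : List (Int × Int)) (new_s : String) :
    ∀ (ls : List String) (y : Int), (pvRows path new_s ls y).length = ls.length := by
  intro ls
  induction ls with
  | nil => intro y; rfl
  | cons l ls ih => intro y; simp [pvRows, ih]

theorem pvRows_getElem? (path : List (Int × Int)) (new_s : String) :
    ∀ (ls : List String) (y : Int) (j : Nat),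
      (pvRows path new_s ls y)[j]? = ls[j]?.map (fun l => pvRow path new_s (y + (j : Int)) l.toList 0) := by
  intro ls
  induction ls with
  | nil => intro y j; rfl
  | cons l ls ih =>
      intro y j
      cases j with
      | zero => simp [pvRows]
      | succ j =>
          simp [pvRows, ih, List.getElem?_cons_succ]
          rw [show y + ((j : Int) + 1) = y + 1 + (j : Int) by ring]

-- ---- A's folds compute pvRows ----

theorem pvA_inner (path : List (Int × Int)) (new_s : String) (y : Int) :
    ∀ (cs : List Char) (x : Int) (init : List String),
      (PySem.List.enumerate cs x).foldl (fun new_line xs =>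
          new_line ++ [if (xs.1, y) ∈ path then (if xs.2 = 'S' then new_s else String.singleton xs.2) else "*"]) init
        = init ++ pvRow path new_s y cs x := by
  intro cs
  induction cs with
  | nil => intro x init; simp [PySem.List.enumerate_nil, pvRow]
  | cons c cs ih =>
      intro x init
      simp [PySem.List.enumerate_cons, ih, pvRow, pvCell]

theorem pvA_outer (path : List (Int × Int)) (new_s : String) :
    ∀ (ls : List String) (y : Int) (init : List String),
      (PySem.List.enumerate ls y).foldl (fun cleaned_map yl =>
          cleaned_map ++ [String.join ((PySem.List.enumerate yl.2.toList 0).foldl (fun new_line xs =>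
            new_line ++ [if (xs.1, yl.1) ∈ path then (if xs.2 = 'S' then new_s else String.singleton xs.2) else "*"]) [])]) init
        = init ++ (pvRows path new_s ls y).map String.join := by
  intro ls
  induction ls with
  | nil => intro y init; simp [PySem.List.enumerate_nil, pvRows]
  | cons l ls ih =>
      intro y init
      simp only [PySem.List.enumerate_cons, List.foldl_cons, ih, pvRows, List.map_cons]
      rw [pvA_inner path new_s y l.toList 0 []]
      simp

theorem pvA_eq (lines : List String) (path : List (Int × Int)) (new_s : String) :
    get_cleaned_map lines path new_s = (pvRows path new_s lines 0).map String.join := by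
  unfold get_cleaned_map
  rw [pvA_outer path new_s lines 0 []]
  simp

-- ---- B's initial grid is pvRows for the empty path ----

theorem pvInit_row (new_s : String) (y : Int) :
    ∀ (cs : List Char) (x : Int), cs.map (fun _ => "*") = pvRow [] new_s y cs x := by
  intro cs
  induction cs with
  | nil => intro x; rfl
  | cons c cs ih =>
      intro x
      simp only [List.map_cons, pvRow]
      rw [← ih (x + 1)]
      simp [pvCell]

theorem pvInit_rows (new_s : String) :
    ∀ (ls : List String) (y : Int),
      ls.map (fun line => line.toList.map (fun _ => "*")) = pvRows [] new_s ls y := by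
  intro ls
  induction ls with
  | nil => intro y; rfl
  | cons l ls ih =>
      intro y
      simp only [List.map_cons, pvRows]
      rw [← ih (y + 1), ← pvInit_row new_s y l.toList 0]

-- ---- painting one point extends the painted set ----

theorem pvCell_irrelevant (path : List (Int × Int)) (p : Int × Int) (new_s : String)
    (x y : Int) (sym : Char) (h : (x, y) ≠ p) :
    pvCell (path ++ [p]) new_s x y sym = pvCell path new_s x y sym := by
  simp [pvCell, List.mem_append, h]

theorem pvRow_irrelevant (path : List (Int × Int)) (p : Int × Int) (new_s : String) (y : Int)
    (cs : List Char) (x : Int) (h : ∀ k : Nat, k < cs.length → ((x + (k : Int)), y) ≠ p) :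
    pvRow (path ++ [p]) new_s y cs x = pvRow path new_s y cs x := by
  apply List.ext_getElem?
  intro k
  rw [pvRow_getElem?, pvRow_getElem?]
  by_cases hk : k < cs.length
  · rw [List.getElem?_eq_getElem hk]
    simp only [Option.map_some]
    rw [pvCell_irrelevant path p new_s _ y _ (h k hk)]
  · rw [List.getElem?_eq_none (by omega)]; rfl

theorem pvPaint_step (lines : List String) (new_s : String) (S : List (Int × Int)) (p : Int × Int) :
    pvPaint lines new_s (pvRows S new_s lines 0) p = pvRows (S ++ [p]) new_s lines 0 := by
  unfold pvPaint
  by_cases hc : 0 ≤ p.2 ∧ p.2.toNat < lines.length ∧ 0 ≤ p.1 ∧ p.1.toNat < (lines.getD p.2.toNat "").toList.length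
  · obtain ⟨hy0, hyl, hx0, hxl⟩ := hc
    rw [if_pos ⟨hy0, hyl, hx0, hxl⟩]
    have hline : lines.getD p.2.toNat "" = lines[p.2.toNat]'hyl := List.getD_eq_getElem lines "" hyl
    rw [hline] at hxl
    have hpx : p.1 = (p.1.toNat : Int) := by omega
    have hpy : p.2 = (p.2.toNat : Int) := by omega
    apply List.ext_getElem?
    intro j
    rw [List.getElem?_set]
    by_cases hj : p.2.toNat = j
    · subst hj
      rw [if_pos rfl, if_pos (by rw [pvRows_length]; exact hyl)]
      rw [pvRows_getElem? (S ++ [p]), List.getElem?_eq_getElem hyl, Option.map_some]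
      congr 1
      have hrow : (pvRows S new_s lines 0).getD p.2.toNat []
          = pvRow S new_s ((p.2.toNat : Nat) : Int) (lines[p.2.toNat]'hyl).toList 0 := by
        rw [List.getD_eq_getElem?_getD, pvRows_getElem?, List.getElem?_eq_getElem hyl]
        simp
      rw [hrow]
      apply List.ext_getElem?
      intro k
      rw [List.getElem?_set, pvRow_getElem?, pvRow_getElem?]
      simp only [zero_add]
      by_cases hk : p.1.toNat = k
      · subst hk
        rw [if_pos rfl, if_pos (by rw [pvRow_length]; exact hxl)]
        rw [List.getElem?_eq_getElem hxl, Option.map_some, hline]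
        have hmem : (((p.1.toNat : Nat) : Int), ((p.2.toNat : Nat) : Int)) ∈ S ++ [p] := by
          simp only [List.mem_append, List.mem_singleton]
          right
          rw [← hpx, ← hpy]
        rw [pvCell, if_pos hmem]
        rw [List.getD_eq_getElem _ ' ' hxl]
      · rw [if_neg hk]
        by_cases hklt : k < (lines[p.2.toNat]'hyl).toList.length
        · rw [List.getElem?_eq_getElem hklt]
          simp only [Option.map_some]
          rw [pvCell_irrelevant]
          intro hcontra
          apply hk
          have h1 := congrArg Prod.fst hcontra
          simp at h1
          omega
        · rw [List.getElem?_eq_none (by omega)]; rfl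
    · rw [if_neg hj, pvRows_getElem?, pvRows_getElem?]
      simp only [zero_add]
      by_cases hjlt : j < lines.length
      · rw [List.getElem?_eq_getElem hjlt]
        simp only [Option.map_some]
        rw [pvRow_irrelevant]
        intro k hklt hcontra
        apply hj
        have h2 := congrArg Prod.snd hcontra
        simp at h2
        omega
      · rw [List.getElem?_eq_none (show lines.length ≤ j by omega)]; rfl
  · rw [if_neg hc]
    apply List.ext_getElem?
    intro j
    rw [pvRows_getElem?, pvRows_getElem?]
    simp only [zero_add]
    by_cases hjlt : j < lines.length
    · rw [List.getElem?_eq_getElem hjlt]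
      simp only [Option.map_some]
      rw [pvRow_irrelevant]
      intro k hklt hcontra
      apply hc
      have hy := congrArg Prod.snd hcontra
      have hx := congrArg Prod.fst hcontra
      simp at hx hy
      refine ⟨by omega, by omega, by omega, ?_⟩
      have hjn : p.2.toNat = j := by omega
      rw [hjn, List.getD_eq_getElem lines "" hjlt]
      omega
    · rw [List.getElem?_eq_none (show lines.length ≤ j by omega)]; rfl

theorem pvFold_paint (lines : List String) (new_s : String) :
    ∀ (path S : List (Int × Int)),
      path.foldl (pvPaint lines new_s) (pvRows S new_s lines 0) = pvRows (S ++ path) new_s lines 0 := by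
  intro path
  induction path with
  | nil => intro S; simp
  | cons p path ih =>
      intro S
      rw [List.foldl_cons, pvPaint_step, ih]
      simp

-- ===== VERDICT (by name: the statement is the Claim_ definition above) =====
theorem get_cleaned_map_spec : Claim_equal_get_cleaned_map := by
  intro lines path new_s _
  unfold Spec_get_cleaned_map get_cleaned_map_alt
  show _ = List.map String.join (path.foldl (pvPaint lines new_s) (lines.map (fun line => line.toList.map (fun _ => "*"))))
  rw [pvA_eq, pvInit_rows new_s lines 0, pvFold_paint lines new_s path []]
  simp
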